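-- pv_equiv track=rewrite | github.com/sergushenkov/advent_of_code | y2023/07/d07_1_upd.py | calculate_hands_weight
-- ===== SOURCE A (Python) =====
-- def calculate_hands_weight(str_hand):
--     cards_weight = {
--         "A": 12,
--         "K": 11,
--         "Q": 10,
--         "J": 9,
--         "T": 8,
--         "9": 7,
--         "8": 6,
--         "7": 5,
--         "6": 4,
--         "5": 3,
--         "4": 2,
--         "3": 1,
--         "2": 0,
--     }
--     hands_weight = 0
--     for card in str_hand:
--         hands_weight = hands_weight * 13 + cards_weight[card]
--     return hands_weight
-- ===== SOURCE B (Python) =====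
-- def calculate_hands_weight(str_hand):
--     cards_weight = {
--         "A": 12,
--         "K": 11,
--         "Q": 10,
--         "J": 9,
--         "T": 8,
--         "9": 7,
--         "8": 6,
--         "7": 5,
--         "6": 4,
--         "5": 3,
--         "4": 2,
--         "3": 1,
--         "2": 0,
--     }
--     n = len(str_hand)
--     return sum(cards_weight[c] * 13 ** (n - 1 - i) for i, c in enumerate(str_hand))
-- ===== Notes on version B (the rewrite author's own statement) =====
-- stated objective: alternative
-- what changed: Replaces the Horner-style accumulator fold (acc = acc*13 + weight) with a direct positional-weight summation: each card's weight is multiplied by its own power 13**(n-1-i) and the products are summed.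
import Mathlib
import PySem

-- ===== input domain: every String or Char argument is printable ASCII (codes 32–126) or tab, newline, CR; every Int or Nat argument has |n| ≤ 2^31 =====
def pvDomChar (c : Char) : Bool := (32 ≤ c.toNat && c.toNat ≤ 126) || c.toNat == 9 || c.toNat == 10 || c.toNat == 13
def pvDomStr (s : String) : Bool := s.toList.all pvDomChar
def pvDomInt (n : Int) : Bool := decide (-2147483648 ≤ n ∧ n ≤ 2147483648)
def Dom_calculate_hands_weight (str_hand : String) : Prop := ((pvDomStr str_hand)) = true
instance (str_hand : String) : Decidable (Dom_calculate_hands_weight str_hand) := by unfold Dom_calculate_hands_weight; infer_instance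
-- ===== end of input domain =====

-- B replaces A's Horner accumulator fold by a direct positional-weight summation
-- (weight[c] * 13^(n-1-i) summed over enumerate); same values, alternative decomposition.

-- ===== PORT A =====
-- the cards_weight dict lookup for a single-character card (shared by both ports,
-- since both Pythons define the same literal dict); none = KeyError
def cwA (c : Char) : Option Int :=
  match c with
  | 'A' => some 12 | 'K' => some 11 | 'Q' => some 10 | 'J' => some 9
  | 'T' => some 8  | '9' => some 7  | '8' => some 6  | '7' => some 5
  | '6' => some 4  | '5' => some 3  | '4' => some 2  | '3' => some 1
  | '2' => some 0  | _ => none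

-- Horner fold: hands_weight = hands_weight * 13 + cards_weight[card]; a none lookup
-- (Python KeyError) poisons the fold and is excluded by Pre_.
def calculate_hands_weight (str_hand : String) : Int :=
  (str_hand.toList.foldl
    (fun acc c => acc.bind (fun a => (cwA c).map (fun w => a * 13 + w)))
    (some 0)).getD 0

-- ===== PORT B =====
-- sum(cards_weight[c] * 13 ** (n - 1 - i) for i, c in enumerate(str_hand));
-- the exponent n-1-i is computed in Nat (exact: enumerate indices satisfy 0 ≤ i < n).
def calculate_hands_weight_alt (str_hand : String) : Int :=
  let n := str_hand.toList.length
  (PySem.List.enumerate str_hand.toList 0).foldl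
    (fun acc ic => acc + ((cwA ic.2).getD 0) * (13 : Int) ^ (n - 1 - ic.1.toNat)) 0

-- ===== PRECONDITION & SPEC =====
-- Pre_ excludes exactly the strings containing a character outside the 13 card keys,
-- on which Python A (and B) raise KeyError.
def Pre_calculate_hands_weight (str_hand : String) : Prop :=
  (str_hand.toList.all (fun c => (cwA c).isSome)) = true
instance (str_hand : String) : Decidable (Pre_calculate_hands_weight str_hand) := by
  unfold Pre_calculate_hands_weight; infer_instance

def pvWitness_calculate_hands_weight : String := "AKQJT"

def Spec_calculate_hands_weight (str_hand : String) (out : Int) : Prop :=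
  out = calculate_hands_weight_alt str_hand
instance (str_hand : String) (out : Int) : Decidable (Spec_calculate_hands_weight str_hand out) := by
  unfold Spec_calculate_hands_weight; infer_instance

-- ===== CLAIM (what is proved, stated in full; the proofs are below) =====
def Claim_equal_calculate_hands_weight : Prop := ∀ (str_hand : String), Dom_calculate_hands_weight str_hand → Pre_calculate_hands_weight str_hand → Spec_calculate_hands_weight str_hand (calculate_hands_weight str_hand)

-- ===== LEMMAS AND PROOFS =====

-- positional value of a suffix: head weighted by 13^(tail length)
def posVal : List Char → Int
  | [] => 0
  | c :: t => (cwA c).getD 0 * (13 : Int) ^ t.length + posVal t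

theorem hornerA (l : List Char) (a : Int) (h : ∀ c ∈ l, (cwA c).isSome = true) :
    l.foldl (fun acc c => acc.bind (fun a => (cwA c).map (fun w => a * 13 + w))) (some a)
      = some (a * (13 : Int) ^ l.length + posVal l) := by
  induction l generalizing a with
  | nil => simp [posVal]
  | cons c t ih =>
    obtain ⟨w, hw⟩ := Option.isSome_iff_exists.mp (h c (List.mem_cons_self))
    simp only [List.foldl_cons, Option.bind_some, hw, Option.map_some,
      ih _ (fun x hx => h x (List.mem_cons_of_mem _ hx)), posVal, List.length_cons,
      Option.getD_some]
    congr 1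
    ring

theorem sumB (n : Nat) (t : List Char) (j : Nat) (acc : Int) (hn : n = j + t.length) :
    (PySem.List.enumerate t (j : Int)).foldl
      (fun acc ic => acc + ((cwA ic.2).getD 0) * (13 : Int) ^ (n - 1 - ic.1.toNat)) acc
      = acc + posVal t := by
  induction t generalizing j acc with
  | nil => simp [PySem.List.enumerate_nil, posVal]
  | cons c t ih =>
    simp only [List.length_cons] at hn
    rw [PySem.List.enumerate_cons]
    simp only [List.foldl_cons]
    have hcast : ((j : Int) + 1) = ((j + 1 : Nat) : Int) := by push_cast; ring
    rw [hcast, ih (j + 1) _ (by omega)]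
    have hexp : n - 1 - ((j : Int)).toNat = t.length := by
      simp only [Int.toNat_natCast]; omega
    rw [hexp, posVal]
    ring

theorem sumB0 (l : List Char) :
    (PySem.List.enumerate l 0).foldl
      (fun acc ic => acc + ((cwA ic.2).getD 0) * (13 : Int) ^ (l.length - 1 - ic.1.toNat)) 0
      = posVal l := by
  have h := sumB l.length l 0 0 (by omega)
  simpa using h

-- ===== VERDICT (by name: the statement is the Claim_ definition above) =====
theorem calculate_hands_weight_spec : Claim_equal_calculate_hands_weight := by
  intro s _ hpre
  simp only [Pre_calculate_hands_weight, List.all_eq_true] at hpre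
  simp only [Spec_calculate_hands_weight, calculate_hands_weight,
    calculate_hands_weight_alt]
  rw [hornerA s.toList 0 hpre, sumB0]
  simp
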